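-- pv_equiv track=rewrite | github.com/YoussefTrabelsi1/Leetcode_solutions | Python/Number of Ways to Divide a Long Corridor/brute_force_with_fallback.py | _optimal_stream
-- ===== SOURCE A (Python) =====
-- MOD = 1_000_000_007
--
-- def _optimal_stream(corridor: str) -> int:
--     total_seats = corridor.count("S")
--     if total_seats == 0 or (total_seats & 1):
--         return 0
--
--     pairs = total_seats // 2
--     ways = 1
--
--     seats_in_pair = 0
--     pairs_done = 0
--     prev_second = -1
--
--     for idx, ch in enumerate(corridor):
--         if ch != "S":
--             continue
--
--         # First seat of a new pair (after at least one pair completed)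
--         if pairs_done > 0 and seats_in_pair == 0:
--             ways = (ways * (idx - prev_second)) % MOD
--
--         seats_in_pair += 1
--         if seats_in_pair == 2:
--             prev_second = idx
--             seats_in_pair = 0
--             pairs_done += 1
--             if pairs_done == pairs:
--                 break
--
--     return ways % MOD
-- ===== SOURCE B (Python) =====
-- MOD = 1_000_000_007
--
-- def _optimal_stream(corridor: str) -> int:
--     pos = [i for i, c in enumerate(corridor) if c == "S"]
--     if not pos or len(pos) % 2:
--         return 0
--     ways = 1
--     k = 2
--     n = len(pos)
--     while k < n:
--         ways = ways * (pos[k] - pos[k - 1]) % MOD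
--         k += 2
--     return ways
-- ===== Notes on version B (the rewrite author's own statement) =====
-- stated objective: simpler
-- what changed: A's single streaming scan over characters with a seats_in_pair/pairs_done/prev_second state machine and an early break is replaced by first building the table of seat positions and then an index-stepping loop (k = 2, 4, ...) over pair boundaries multiplying the gaps pos[k]-pos[k-1] mod 1e9+7.
import Mathlib
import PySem

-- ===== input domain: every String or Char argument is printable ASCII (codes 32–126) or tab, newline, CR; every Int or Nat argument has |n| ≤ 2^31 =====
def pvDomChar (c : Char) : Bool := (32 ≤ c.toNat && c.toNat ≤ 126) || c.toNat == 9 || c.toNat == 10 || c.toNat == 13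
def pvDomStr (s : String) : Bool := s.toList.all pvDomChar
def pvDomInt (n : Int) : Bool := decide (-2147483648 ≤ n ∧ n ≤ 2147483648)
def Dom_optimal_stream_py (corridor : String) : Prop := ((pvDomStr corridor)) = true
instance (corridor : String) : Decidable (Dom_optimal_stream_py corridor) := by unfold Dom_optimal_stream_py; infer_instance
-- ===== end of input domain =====

-- B replaces A's streaming seat/pair state machine over characters by a seat-positions table
-- and an index-stepping loop over pair boundaries (objective: simpler).

-- ===== PORT A =====
-- the for-loop of A: state (ways, seats_in_pair, pairs_done, prev_second); returning = break/loop end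
def aLoop (pairs : Int) : List (Int × Char) → Int → Int → Int → Int → Int
  | [], ways, _, _, _ => ways
  | (idx, ch) :: rest, ways, sip, pd, prev =>
    if ch ≠ 'S' then aLoop pairs rest ways sip pd prev
    else
      let ways' := if 0 < pd ∧ sip = 0 then PySem.Int.mod (ways * (idx - prev)) 1000000007 else ways
      if sip + 1 = 2 then
        (if pd + 1 = pairs then ways'
         else aLoop pairs rest ways' 0 (pd + 1) idx)
      else aLoop pairs rest ways' (sip + 1) pd prev

def optimal_stream_py (corridor : String) : Int :=
  let total : Int := (PySem.Str.count corridor "S" : Int)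
  if total = 0 ∨ PySem.Int.band total 1 ≠ 0 then 0
  else
    let pairs := PySem.Int.floordiv total 2
    PySem.Int.mod (aLoop pairs (PySem.List.enumerate corridor.toList) 1 0 0 (-1)) 1000000007

-- ===== PORT B =====
-- the while-loop of B: 'while k < n: ways = ways * (pos[k] - pos[k-1]) % MOD; k += 2'
def bWhile (pos : List Int) (n : Int) (k : Int) (ways : Int) : Int :=
  if k < n then
    bWhile pos n (k + 2)
      (PySem.Int.mod (ways * (PySem.List.pyGetD pos k 0 - PySem.List.pyGetD pos (k - 1) 0)) 1000000007)
  else ways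
termination_by (n - k).toNat
decreasing_by simp_wf; omega

def optimal_stream_py_alt (corridor : String) : Int :=
  let pos : List Int := ((PySem.List.enumerate corridor.toList).filter (fun ic => ic.2 == 'S')).map (·.1)
  if pos = [] ∨ PySem.Int.mod (pos.length : Int) 2 ≠ 0 then 0
  else bWhile pos (pos.length : Int) 2 1

-- ===== PRECONDITION & SPEC =====
def Spec_optimal_stream_py (corridor : String) (out : Int) : Prop := out = optimal_stream_py_alt corridor
instance (corridor : String) (out : Int) : Decidable (Spec_optimal_stream_py corridor out) := by unfold Spec_optimal_stream_py; infer_instance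

-- ===== CLAIM (what is proved, stated in full; the proofs are below) =====
def Claim_equal_optimal_stream_py : Prop := ∀ (corridor : String), Dom_optimal_stream_py corridor → Spec_optimal_stream_py corridor (optimal_stream_py corridor)

-- ===== LEMMAS AND PROOFS =====

-- seat-level view of A's loop: same state machine, but stepping over the seat positions only
def sLoop (pairs : Int) : List Int → Int → Int → Int → Int → Int
  | [], ways, _, _, _ => ways
  | p :: rest, ways, sip, pd, prev =>
      let ways' := if 0 < pd ∧ sip = 0 then PySem.Int.mod (ways * (p - prev)) 1000000007 else ways
      if sip + 1 = 2 then
        (if pd + 1 = pairs then ways'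
         else sLoop pairs rest ways' 0 (pd + 1) p)
      else sLoop pairs rest ways' (sip + 1) pd prev

-- pair-consuming view of B's loop
def bWays : List Int → Int → Int
  | a :: b :: rest, ways => bWays rest (PySem.Int.mod (ways * (b - a)) 1000000007)
  | _, ways => ways

def posOf (l : List (Int × Char)) : List Int := (l.filter (fun ic => ic.2 == 'S')).map (·.1)

lemma bWays_short (t : List Int) (w : Int) (h : t.length ≤ 1) : bWays t w = w := by
  match t with
  | [] => rfl
  | [a] => rfl
  | a :: b :: r => simp at h

lemma aLoop_eq_sLoop (pairs : Int) (l : List (Int × Char)) :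
    ∀ (ways sip pd prev : Int),
      aLoop pairs l ways sip pd prev = sLoop pairs (posOf l) ways sip pd prev := by
  induction l with
  | nil => intro ways sip pd prev; rfl
  | cons ic rest ih =>
      intro ways sip pd prev
      obtain ⟨idx, ch⟩ := ic
      by_cases h : ch = 'S'
      · subst h
        have hp : posOf ((idx, 'S') :: rest) = idx :: posOf rest := by simp [posOf]
        rw [hp]
        simp only [aLoop, sLoop, ne_eq]
        norm_num
        split_ifs <;> simp [ih]
      · have hp : posOf ((idx, ch) :: rest) = posOf rest := by simp [posOf, h]
        rw [hp]
        simp only [aLoop, ne_eq, h, not_false_eq_true, if_pos]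
        exact ih ways sip pd prev

lemma sLoop_eq_bWays (n : Nat) : ∀ (rest : List Int), rest.length ≤ n →
    ∀ (m pd prev w : Int), 0 < pd → pd ≤ m → (rest.length : Int) = 2 * (m - pd) →
      sLoop m rest w 0 pd prev = bWays (prev :: rest) w := by
  induction n with
  | zero =>
      intro rest hn m pd prev w hpd hpm hlen
      have h0 : rest = [] := List.eq_nil_of_length_eq_zero (by omega)
      subst h0
      rfl
  | succ n ih =>
      intro rest hn m pd prev w hpd hpm hlen
      match rest with
      | [] => rfl
      | [a] => exfalso; simp at hlen; omega
      | a :: b :: r =>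
          have hstep : sLoop m (a :: b :: r) w 0 pd prev =
              (if pd + 1 = m then PySem.Int.mod (w * (a - prev)) 1000000007
               else sLoop m r (PySem.Int.mod (w * (a - prev)) 1000000007) 0 (pd + 1) b) := by
            simp [sLoop, hpd]
          have hrhs : bWays (prev :: a :: b :: r) w =
              bWays (b :: r) (PySem.Int.mod (w * (a - prev)) 1000000007) := by
            simp [bWays]
          rw [hstep, hrhs]
          simp only [List.length_cons] at hlen hn
          by_cases hlast : pd + 1 = m
          · have hr : r = [] := List.eq_nil_of_length_eq_zero (by omega)
            subst hr
            simp [hlast, bWays]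
          · rw [if_neg hlast]
            exact ih r (by omega) m (pd + 1) b _ (by omega) (by omega) (by omega)

lemma bWays_bounds (n : Nat) : ∀ (t : List Int), t.length ≤ n → ∀ (w : Int), 0 ≤ w → w < 1000000007 →
    0 ≤ bWays t w ∧ bWays t w < 1000000007 := by
  induction n with
  | zero =>
      intro t hn w h1 h2
      rw [bWays_short _ _ (by omega)]
      exact ⟨h1, h2⟩
  | succ n ih =>
      intro t hn w h1 h2
      match t with
      | [] => exact ⟨h1, h2⟩
      | [a] => exact ⟨h1, h2⟩
      | a :: b :: r =>
          simp only [bWays]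
          simp only [List.length_cons] at hn
          exact ih r (by omega) _ (PySem.Int.mod_nonneg _ (by norm_num))
            (PySem.Int.mod_lt _ (by norm_num))

lemma bWhile_eq_bWays (fuel : Nat) : ∀ (pos : List Int) (k w : Int), 1 ≤ k →
    ((pos.length : Int) - k).toNat ≤ fuel →
    bWhile pos (pos.length : Int) k w = bWays (pos.drop (k - 1).toNat) w := by
  induction fuel with
  | zero =>
      intro pos k w hk hf
      rw [bWhile, if_neg (by omega)]
      rw [bWays_short _ _ (by rw [List.length_drop]; omega)]
  | succ fuel ih =>
      intro pos k w hk hf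
      rw [bWhile]
      by_cases h : k < (pos.length : Int)
      · rw [if_pos h]
        have hj1 : (k - 1).toNat + 1 < pos.length := by omega
        have hj0 : (k - 1).toNat < pos.length := by omega
        have hd : pos.drop (k - 1).toNat =
            pos[(k - 1).toNat] :: pos[(k - 1).toNat + 1] :: pos.drop ((k - 1).toNat + 2) := by
          rw [List.drop_eq_getElem_cons hj0, List.drop_eq_getElem_cons hj1]
        have e1 : PySem.List.pyGetD pos k 0 = pos[(k - 1).toNat + 1] := by
          rw [PySem.List.pyGetD_eq_getElem pos 0 (by omega) (by omega)]
          congr 1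
          omega
        have e2 : PySem.List.pyGetD pos (k - 1) 0 = pos[(k - 1).toNat] := by
          rw [PySem.List.pyGetD_eq_getElem pos 0 (by omega) (by omega)]
        rw [hd, e1, e2]
        simp only [bWays]
        rw [ih pos (k + 2) _ (by omega) (by omega)]
        congr 2
        omega
      · rw [if_neg h]
        rw [bWays_short _ _ (by rw [List.length_drop]; omega)]

lemma length_posOf (cs : List Char) : ∀ (s : Int), (posOf (PySem.List.enumerate cs s)).length = cs.count 'S' := by
  induction cs with
  | nil => intro s; rfl
  | cons c cs ih =>
      intro s
      by_cases h : c = 'S' <;>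
        simp [PySem.List.enumerate_cons, posOf, h] <;>
        simp [posOf] at ih <;> simp [ih]

lemma countS_go (fuel : Nat) : ∀ (cs : List Char) (acc : Nat), cs.length ≤ fuel →
    PySem.Chars.count.go ['S'] fuel cs acc = acc + cs.count 'S' := by
  induction fuel with
  | zero =>
      intro cs acc h
      match cs with
      | [] => rfl
      | c :: t => simp at h
  | succ fuel ih =>
      intro cs acc h
      match cs with
      | [] => rfl
      | c :: t =>
          by_cases hc : c = 'S'
          · subst hc
            simp [PySem.Chars.count.go, List.isPrefixOf, ih t (acc + 1) (by simpa using h)]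
            omega
          · simp [PySem.Chars.count.go, List.isPrefixOf, hc, ih t acc (by simpa using h)]
            intro hx
            exact absurd hx.symm hc

lemma countS (cs : List Char) : PySem.Chars.count cs ['S'] = cs.count 'S' := by
  simp [PySem.Chars.count, countS_go cs.length cs 0 le_rfl]

-- ===== VERDICT (by name: the statement is the Claim_ definition above) =====
lemma main_core (m : Int) (hm1 : 1 ≤ m) : ∀ (P : List Int), (P.length : Int) = 2 * m →
    PySem.Int.mod (sLoop m P 1 0 0 (-1)) 1000000007 = bWays (P.drop 1) 1 := by
  intro P hlen
  match P with
  | [] => simp at hlen; omega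
  | [p] => simp at hlen; omega
  | p0 :: p1 :: r =>
      have hstep : sLoop m (p0 :: p1 :: r) 1 0 0 (-1) =
          (if (0 : Int) + 1 = m then 1 else sLoop m r 1 0 (0 + 1) p1) := by
        simp [sLoop]
      rw [hstep]
      simp only [List.length_cons] at hlen
      by_cases hm2 : (0 : Int) + 1 = m
      · have hr : r = [] := List.eq_nil_of_length_eq_zero (by omega)
        subst hr
        rw [if_pos hm2]
        rfl
      · rw [if_neg hm2]
        rw [sLoop_eq_bWays r.length r le_rfl m (0 + 1) p1 1 (by norm_num) (by omega)
              (by push_cast at hlen; omega)]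
        have hb := bWays_bounds (p1 :: r).length (p1 :: r) le_rfl 1 (by norm_num) (by norm_num)
        show PySem.Int.mod (bWays (p1 :: r) 1) 1000000007 = bWays (p1 :: r) 1
        rw [PySem.Int.mod_eq_emod_of_pos (by norm_num)]
        exact Int.emod_eq_of_lt hb.1 hb.2

theorem optimal_stream_py_spec : Claim_equal_optimal_stream_py := by
  intro corridor _
  unfold Spec_optimal_stream_py optimal_stream_py optimal_stream_py_alt
  have hcnt : PySem.Str.count corridor "S" = corridor.toList.count 'S' := by
    have h0 : PySem.Str.count corridor "S" = PySem.Chars.count corridor.toList ['S'] := rfl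
    rw [h0, countS]
  set cs := corridor.toList with hcs
  have hpos : ((PySem.List.enumerate cs).filter (fun ic => ic.2 == 'S')).map (·.1) =
      posOf (PySem.List.enumerate cs) := rfl
  simp only [hcnt, hpos]
  have hlenpos : (posOf (PySem.List.enumerate cs)).length = cs.count 'S' := length_posOf cs 0
  have hband : PySem.Int.band ((cs.count 'S' : Int)) 1 = PySem.Int.mod ((cs.count 'S' : Int)) 2 :=
    PySem.Int.band_one _
  by_cases hz : cs.count 'S' = 0
  · have hplen : posOf (PySem.List.enumerate cs) = [] :=
      List.eq_nil_of_length_eq_zero (by omega)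
    simp [hz, hplen]
  · by_cases hodd : PySem.Int.mod ((cs.count 'S' : Int)) 2 ≠ 0
    · rw [if_pos (Or.inr (by rw [hband]; exact hodd))]
      rw [if_pos (Or.inr (by rw [hlenpos]; exact hodd))]
    · rw [not_ne_iff] at hodd
      have hdvd : (2 : Int) ∣ (cs.count 'S' : Int) := by
        rw [← PySem.Int.mod_eq_zero_iff_dvd]; exact hodd
      rw [if_neg (by simp [hband]; omega)]
      rw [if_neg (by rw [hlenpos]
                     rw [not_or]
                     refine ⟨fun hc => hz (by simpa [hc] using hlenpos.symm), ?_⟩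
                     simpa using hodd)]
      obtain ⟨m, hm⟩ := hdvd
      have hm1 : 1 ≤ m := by omega
      have hfd : PySem.Int.floordiv ((cs.count 'S' : Int)) 2 = m := by
        rw [PySem.Int.floordiv_eq_ediv_of_pos (by norm_num), hm]
        omega
      rw [hfd, aLoop_eq_sLoop]
      rw [bWhile_eq_bWays (posOf (PySem.List.enumerate cs)).length _ 2 1 (by norm_num) (by omega)]
      have hdropeq : ((2 : Int) - 1).toNat = 1 := by norm_num
      rw [hdropeq]
      exact main_core m hm1 _ (by rw [hlenpos, hm])
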